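-- pv_equiv track=rewrite | github.com/shressujan/Intro-to-Python | murder-mystery.py | findTheWitnesses
-- ===== SOURCE A (Python) =====
-- def findTheWitnesses(heights):
--     # First person can see because no one is blocking in front of him.
--     numOfWitnesses = 1
--     # First person also acts as a wall between the crime scene and remaining people on the list.
--     heightOfWall = heights[-1]
--
--     for i in (range(len(heights) - 1, 0, -1)):
--         if heights[i] > heightOfWall:
--             numOfWitnesses += 1
--             heightOfWall = heights[i]  # new height for the wall
--
--     return numOfWitnesses
-- ===== SOURCE B (Python) =====
-- def findTheWitnesses(heights):
--     # Build the sequence of wall heights (running maximum, seeded with the last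
--     # person) and return the number of distinct wall heights: each strict
--     # increase of the wall is exactly one new witness.
--     walls = [heights[-1]]
--     for h in reversed(heights[1:]):
--         walls.append(walls[-1] if walls[-1] > h else h)
--     return len(set(walls))
-- ===== Notes on version B (the rewrite author's own statement) =====
-- stated objective: alternative
-- what changed: B builds the wall-height sequence (the running maximum, seeded with the last person) as an explicit list and returns its number of distinct values via a set, instead of A's index loop that increments a counter each time the wall rises.
import Mathlib
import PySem

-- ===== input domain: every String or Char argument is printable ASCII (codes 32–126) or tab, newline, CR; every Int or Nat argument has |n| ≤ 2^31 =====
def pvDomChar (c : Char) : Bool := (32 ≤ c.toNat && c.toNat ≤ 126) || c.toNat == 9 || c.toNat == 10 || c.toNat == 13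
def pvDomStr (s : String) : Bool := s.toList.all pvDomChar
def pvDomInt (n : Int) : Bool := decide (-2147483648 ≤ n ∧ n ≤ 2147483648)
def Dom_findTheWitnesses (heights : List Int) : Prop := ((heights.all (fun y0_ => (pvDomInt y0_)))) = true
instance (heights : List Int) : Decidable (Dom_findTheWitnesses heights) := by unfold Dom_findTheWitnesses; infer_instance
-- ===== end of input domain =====

-- B replaces A's counter-and-wall index loop by building the wall-height (running-maximum)
-- sequence as a list and counting its distinct values with a set (alternative decomposition,
-- same cost).


-- ===== PORT A =====
def findTheWitnesses (heights : List Int) : Int :=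
  let numOfWitnesses : Int := 1
  let heightOfWall : Int := PySem.List.pyGetD heights (-1) 0
  let st := (PySem.List.pyRange ((heights.length : Int) - 1) 0 (-1)).foldl
    (fun (st : Int × Int) i =>
      if PySem.List.pyGetD heights i 0 > st.2 then (st.1 + 1, PySem.List.pyGetD heights i 0)
      else st)
    (numOfWitnesses, heightOfWall)
  st.1

-- ===== PORT B =====
def findTheWitnesses_alt (heights : List Int) : Int :=
  let walls := ((PySem.List.slice heights (some 1) none).reverse).foldl
    (fun (walls : List Int) h =>
      walls ++ [if PySem.List.pyGetD walls (-1) 0 > h then PySem.List.pyGetD walls (-1) 0 else h])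
    [PySem.List.pyGetD heights (-1) 0]
  ((PySem.Set.ofList walls).length : Int)

-- ===== PRECONDITION & SPEC =====
-- Pre_ excludes only the empty list, on which A raises IndexError reading the last element.
def Pre_findTheWitnesses (heights : List Int) : Prop := heights ≠ []
instance (heights : List Int) : Decidable (Pre_findTheWitnesses heights) := by
  unfold Pre_findTheWitnesses; infer_instance
def pvWitness_findTheWitnesses : List Int := [3, 1, 4, 1]

def Spec_findTheWitnesses (heights : List Int) (out : Int) : Prop :=
  out = findTheWitnesses_alt heights
instance (heights : List Int) (out : Int) : Decidable (Spec_findTheWitnesses heights out) := by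
  unfold Spec_findTheWitnesses; infer_instance

-- ===== CLAIM (what is proved, stated in full; the proofs are below) =====
def Claim_equal_findTheWitnesses : Prop := ∀ (heights : List Int), Dom_findTheWitnesses heights → Pre_findTheWitnesses heights → Spec_findTheWitnesses heights (findTheWitnesses heights)

-- ===== LEMMAS AND PROOFS =====

def stepA : Int × Int → Int → Int × Int :=
  fun st h => if h > st.2 then (st.1 + 1, h) else st

def stepC : List Int → Int → List Int :=
  fun walls h =>
    walls ++ [if PySem.List.pyGetD walls (-1) 0 > h then PySem.List.pyGetD walls (-1) 0 else h]

-- A on a nonempty list is the stepA-fold over the reversed tail, seeded with the last element.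
lemma A_eq (h0 : Int) (t : List Int) :
    findTheWitnesses (h0 :: t) =
      (t.reverse.foldl stepA (1, (h0 :: t).getLast (List.cons_ne_nil _ _))).1 := by
  show ((PySem.List.pyRange (((h0 :: t).length : Int) - 1) 0 (-1)).foldl
      (fun st i => stepA st (PySem.List.pyGetD (h0 :: t) i 0))
      (1, PySem.List.pyGetD (h0 :: t) (-1) 0)).1 = _
  rw [PySem.List.pyGetD_neg_one (h0 :: t) 0 (List.cons_ne_nil _ _)]
  rw [show (((h0 :: t).length : Int) - 1) = (t.length : Int) by push_cast [List.length_cons]; ring]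
  rw [PySem.List.pyRange_neg_one_eq_reverse]
  rw [← List.foldl_map (f := fun i => PySem.List.pyGetD (h0 :: t) i 0) (g := stepA)]
  rw [List.map_reverse]
  congr 1
  have : ((t.length : Int) + 1) = ((h0 :: t).length : Int) := by push_cast [List.length_cons]; ring
  rw [show (0 : Int) + 1 = 1 by ring, this,
      PySem.List.map_pyGetD_pyRange' (h0 :: t) 0 (by omega : (0:Int) ≤ 1)]
  simp

lemma B_eq (heights : List Int) :
    findTheWitnesses_alt heights =
      ((PySem.Set.ofList
        (((PySem.List.slice heights (some 1) none).reverse).foldl stepC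
          [PySem.List.pyGetD heights (-1) 0])).length : Int) := rfl

-- With a nonempty wall list whose last entry is the current wall w and an upper bound w on
-- all recorded walls, a stepC-fold grows the distinct-wall count exactly as a stepA-fold
-- grows A's counter.
lemma fold_inv (l : List Int) (c w : Int) (walls : List Int)
    (hlast : walls.getLast? = some w)
    (hlen : ((PySem.Set.ofList walls).length : Int) = c)
    (hub : ∀ x ∈ walls, x ≤ w) :
    ((PySem.Set.ofList (l.foldl stepC walls)).length : Int) = (l.foldl stepA (c, w)).1 := by
  induction l generalizing c w walls with
  | nil => simpa using hlen
  | cons h t ih =>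
    have hne : walls ≠ [] := by
      intro he; subst he; simp at hlast
    have hget : PySem.List.pyGetD walls (-1) 0 = w := by
      rw [PySem.List.pyGetD_neg_one walls 0 hne]
      have := List.getLast?_eq_some_getLast hne
      rw [this] at hlast
      exact Option.some_inj.1 hlast
    have hstep : stepC walls h = walls ++ [if w > h then w else h] := by
      simp [stepC, hget]
    simp only [List.foldl_cons, hstep]
    by_cases hc : h > w
    · have hval : (if w > h then w else h) = h := if_neg (by omega)
      have hnot : h ∉ PySem.Set.ofList walls := by
        rw [PySem.Set.mem_ofList]
        intro hin; exact absurd (hub h hin) (by omega)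
      have hstA : stepA (c, w) h = (c + 1, h) := by simp [stepA, hc]
      rw [hval, hstA]
      refine ih (c + 1) h (walls ++ [h]) List.getLast?_concat ?_ ?_
      · rw [PySem.Set.ofList_append_singleton, PySem.Set.add_of_not_mem hnot]
        simp only [List.length_append, List.length_cons, List.length_nil]
        push_cast
        omega
      · intro x hx
        rcases List.mem_append.1 hx with hx | hx
        · exact le_of_lt (lt_of_le_of_lt (hub x hx) hc)
        · simp at hx; omega
    · have hval : (if w > h then w else h) = w := by
        by_cases hw : w > h
        · exact if_pos hw
        · rw [if_neg hw]; omega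
      have hmem : w ∈ PySem.Set.ofList walls := by
        rw [PySem.Set.mem_ofList]
        exact List.mem_of_getLast? hlast
      have hstA : stepA (c, w) h = (c, w) := by simp [stepA, hc]
      rw [hval, hstA]
      refine ih c w (walls ++ [w]) List.getLast?_concat ?_ ?_
      · rw [PySem.Set.ofList_append_singleton, PySem.Set.add_of_mem hmem]
        exact hlen
      · intro x hx
        rcases List.mem_append.1 hx with hx | hx
        · exact hub x hx
        · simp at hx; omega

-- ===== VERDICT (by name: the statement is the Claim_ definition above) =====
theorem findTheWitnesses_spec : Claim_equal_findTheWitnesses := by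
  intro heights hdom hpre
  cases heights with
  | nil => exact absurd rfl hpre
  | cons h0 t =>
    show findTheWitnesses (h0 :: t) = findTheWitnesses_alt (h0 :: t)
    rw [A_eq, B_eq, PySem.List.slice_from_one,
        PySem.List.pyGetD_neg_one (h0 :: t) 0 (List.cons_ne_nil _ _)]
    exact (fold_inv t.reverse 1 ((h0 :: t).getLast (List.cons_ne_nil _ _))
      [(h0 :: t).getLast (List.cons_ne_nil _ _)] rfl
      (by simp [PySem.Set.ofList_cons])
      (by intro x hx; simp at hx; omega)).symm
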